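/-
  THE CARRY LEMMAS OF THE SEGMENTS OF `DGifSlurp` (assertions: Gif/Spec/Seg_DGifSlurp.lean; worked proofs: farm.gif/worked/DGifSlurp.6, .8, .9;
  the shape of a segment proof with these lemmas: farm.gif/hints/DGifSlurp.md). Pure Lean: no machine walk here. Every lemma is proved
  ONCE; a segment proof applies it and does not re-derive it.

  §1  THE LAST COUNTED IMAGE AND ITS RASTER (general: over any `Shape F R mem` with `F.saved = some s`, `s.imgs = init ++ [g]`; the
      hypotheses are the fields `saved`, `imgs` of `DGifSlurp.Last`)                                          namespace Gif.Spec
      Forest.arr_owned           the SavedImages array `(s.arr, 56 · s.cap)` is an owned object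
      Forest.arr_struct          its counted slots `(s.arr, 56 · length)` are a structural window
      Shape.slot_in              the last counted slot is a slot of the array: `init.length + 1 ≤ s.cap`
      Shape.last_img             `ImgAt (s.arr + 56 · init.length) g mem`: the shape of the last counted slot
      Forest.raster_mem          the raster `(r, n)` of the last image is an owned object and a data object
      Shape.raster_shape         `sp->RasterBits = r`, `n = Width · Height`, `1 ≤ n < 2^31`, `1 ≤ Width`, `1 ≤ Height`
      raster_buf                 a range inside the raster is a buffer for DGifGetLine (`BufOK`) and does not meet pv
      arr_kept_getLine           DGifGetLine's footprint misses the SavedImages array: the slot's fields read the same behind the call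
      SlurpWhere, slurp_where    WHERE gif AND THE ARRAY ARE, one inequality per field (for the walker's side conditions)
      Forest.complete_drop       `F'.imgs = init`, the images of `init` complete: `F'.Complete`    (behind DGifDecreaseImageCounter)
      Forest.complete_same       the last image has its raster, the others had: `F.Complete`
      Forest.complete_move       the same for the forest after the move (`Forest.movedPend`)
  §2  THE MOVE OF THE PENDING LIST INTO THE LAST IMAGE (dgif_lib.c:1266-1272, segment 9)
      SlurpWhere.structs_kept    the four stores miss every structural window but the array's
      Forest.img_structs         the structural windows of the counted images are windows of the forest, not at the array's base
      Shape.move_pend            THE STEP OF THE SHAPE: a five-window footprint and four field values give `Shape (F.movedPend s init g)`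
      GifOK.move_pend            THE WHOLE EXIT in one: `HeapInv`, `GifOK` of the new forest, `Complete`, `rem` unchanged
  §3  `Core` AND `At` FROM ONE STATE OF THE BODY TO A LATER ONE                                      namespace Gif.Spec.DGifSlurp
      BodyWin e R x              the window `x` lies where the body may write: the own stack below the six saved registers
                                 `[RA − 848, RA − 48)`, the heap's region and the shadow `[800000H, 1000020H)`, the cursor's `cur`
      Core.carry                 `Core` at a later state: `rsp`, `rbp`, `r14` as they were, a footprint of `BodyWin`s (it keeps the six
                                 saved registers AND the return-address slot `[RA, RA + 8)`)
      At.base                    `Hc.base = 800000H` (turns `Owns.inside` into numbers)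
      At.push_win                the window `[RA − 160, RA − 152)` of a pushed return address, in the four forms the lemmas below
                                 and `LZOK.sameExcept` ask
      At.carry_loose             `At` through a footprint of loose heap windows: same heap, same forest, `rem` unchanged
      At.carry_eq                `At` at a later state with the SAME memory (`jmp`, `mov r, r`, `test ; jcc` behind a call)
      At.env_callee              THE PRECONDITION `Env` OF EVERY CALLEE, at the state of the `call`
      At.after_call              THE HUB: `At` at the state a contract call returned to, for the heap and forest of its post
-/
import Gif.Spec.Seg_DGifSlurp
import Gif.Spec.Carry
import Gif.Spec.Words
namespace Gif.Spec
open X86 X86.User Asan ProgX.Base ProgX.Base.Spec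

/-! ### 1. The last counted image and its raster -/

/-- **The SavedImages array is an owned object.** For `Owns.inside` (where the array is), `Owns.liveIn` (the checks of the loads and
stores of a slot's fields), `Owns.far` (the array against gif, pv, the raster). -/
theorem Forest.arr_owned {F : Forest} {s : Saved} (hs : F.saved = some s) : (s.arr, 56 * s.cap) ∈ F.owned := by
  apply Forest.mem_owned_saved
  rw [hs]
  exact List.mem_cons_self

/-- **The counted slots of the SavedImages array are a structural window.** For `Placed.structs_ne` and `carry_Geo` (the array is
neither gif nor pv nor a data object). -/
theorem Forest.arr_struct {F : Forest} {s : Saved} (hs : F.saved = some s) : (s.arr, 56 * s.imgs.length) ∈ F.structs := by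
  apply carry_mem_structs_saved
  rw [hs]
  exact List.mem_cons_self

/-- **The last counted slot is a slot of the array**: with `Owns.inside` of the array, `sp + 56 ≤ arr + 56 · cap` (every field of
`sp` lies inside the live array). -/
theorem Shape.slot_in {F : Forest} {R : Rd} {mem : Mem} {s : Saved} {init : List Img} {g : Img} (hsh : Shape F R mem)
    (hs : F.saved = some s) (hi : s.imgs = init ++ [g]) : init.length + 1 ≤ s.cap := by
  have hsaved := hsh.saved
  rw [hs] at hsaved
  obtain ⟨_, _, hlen, _, _⟩ := hsaved
  rw [hi] at hlen
  simp only [List.length_append, List.length_singleton] at hlen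
  exact hlen

/-- **The shape of the last counted slot** `sp = s.arr + 56 · init.length`: its colour map, its raster, its extension list
(`ImgAt.cm`, `.raster`, `.ext`). -/
theorem Shape.last_img {F : Forest} {R : Rd} {mem : Mem} {s : Saved} {init : List Img} {g : Img} (hsh : Shape F R mem)
    (hs : F.saved = some s) (hi : s.imgs = init ++ [g]) : ImgAt (s.arr + 56 * init.length) g mem := by
  have hsaved := hsh.saved
  rw [hs] at hsaved
  obtain ⟨_, _, _, _, k5⟩ := hsaved
  have hlen : init.length < s.imgs.length := by
    rw [hi]
    simp only [List.length_append, List.length_singleton]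
    omega
  have himg := k5 init.length hlen
  simp only [hi, List.getElem_append_right (Nat.le_refl _), Nat.sub_self, List.getElem_cons_zero] at himg
  exact himg

/-- **The raster of the last counted image is an owned object and a data object of the forest.** For `Owns.inside` (where the
raster is: `Height ≤ n < 2^22`), `Owns.liveIn`, `Loose.data`, `Owns.far`. -/
theorem Forest.raster_mem {F : Forest} {s : Saved} {init : List Img} {g : Img} {r n : Nat} (hs : F.saved = some s)
    (hi : s.imgs = init ++ [g]) (hr : g.raster = some (r, n)) : (r, n) ∈ F.owned ∧ (r, n) ∈ F.datas := by
  have hg : g ∈ s.imgs := by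
    rw [hi]
    exact List.mem_append_right _ List.mem_cons_self
  have hro : (r, n) ∈ rasterObjs g.raster := by
    rw [hr]
    exact List.mem_cons_self
  constructor
  · apply Forest.mem_owned_saved
    rw [hs]
    apply List.mem_cons_of_mem
    apply List.mem_flatMap.mpr
    refine ⟨g, hg, ?_⟩
    unfold Img.objs
    exact List.mem_append_left _ (List.mem_append_right _ hro)
  · unfold Forest.datas
    apply List.mem_append_left
    apply List.mem_append_right
    rw [hs]
    apply List.mem_flatMap.mpr
    refine ⟨g, hg, ?_⟩
    unfold Img.datas
    exact List.mem_append_left _ (List.mem_append_right _ hro)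

/-- **What the shape says of the raster `(r, n)` of the last counted slot** (`RasterAt`; the facts `IR`'s doc comment lists):
`sp->RasterBits = r`, `n = Width · Height`, `1 ≤ n < 2^31`, `1 ≤ Width`, `1 ≤ Height`. -/
theorem Shape.raster_shape {F : Forest} {R : Rd} {mem : Mem} {s : Saved} {init : List Img} {g : Img} {r n : Nat}
    (hsh : Shape F R mem) (hs : F.saved = some s) (hi : s.imgs = init ++ [g]) (hr : g.raster = some (r, n)) :
    SavedImage.RasterBits mem (s.arr + 56 * init.length) = r ∧
    n = SavedImage.ImageDesc.Width mem (s.arr + 56 * init.length) * SavedImage.ImageDesc.Height mem (s.arr + 56 * init.length) ∧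
    1 ≤ n ∧ n < 2 ^ 31 ∧
    1 ≤ SavedImage.ImageDesc.Width mem (s.arr + 56 * init.length) ∧
    1 ≤ SavedImage.ImageDesc.Height mem (s.arr + 56 * init.length) := by
  have hras := (hsh.last_img hs hi).raster
  rw [hr] at hras
  obtain ⟨k1, k2, k3, k4, k5⟩ := hras
  simp only at k1 k2 k5
  refine ⟨k1, k2, ?_, k5, k3, k4⟩
  rw [k2]
  exact Nat.mul_le_mul k3 k4

/-- **A range `[a, a + k)` inside the raster of the last counted image is a buffer for DGifGetLine** (`BufOK`: live, loose as a part
of a data object, a heap window, a heap address) **and does not meet the private object** (another owned object): DGifGetLine's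
two buffer clauses, for the whole raster (`a = r`, `k = n`) or for one row (`a = r + Width · j`, `k = Width`). `hbase` is `At.base`. -/
theorem raster_buf {H : Heap} {rest : List Obj} {frames : List (Nat × FrameLayout)} {top : Nat} {F : Forest} {R : Rd}
    {mem : Mem} {s : Saved} {init : List Img} {g : Img} {r n : Nat} (hinv : HeapInv H rest frames top mem)
    (hok : GifOK H F R mem) (hbase : H.base = 0x800000) (hs : F.saved = some s) (hi : s.imgs = init ++ [g])
    (hr : g.raster = some (r, n)) (a k : Nat) (h1 : r ≤ a) (h2 : a + k ≤ r + n) :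
    BufOK H rest frames F R a k ∧ (a + k ≤ F.pv ∨ F.pv + 24936 ≤ a) := by
  obtain ⟨hown, hdat⟩ := Forest.raster_mem hs hi hr
  have hin := hok.owns.inside hinv.heap hown
  simp only at hin
  have hpvmem : (F.pv, 24936) ∈ F.owned := List.mem_cons_of_mem _ List.mem_cons_self
  have hne : (r, n) ≠ (F.pv, 24936) := by
    intro e
    have e1 : r = F.pv := congrArg Prod.fst e
    exact ((hok.owns.placed hinv.heap).structs_ne.2 _ hdat).2.1 e1
  have hfar := hok.owns.far hinv.heap hown hpvmem hne
  simp only at hfar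
  refine ⟨⟨?_, ?_, ?_, by omega⟩, by omega⟩
  · exact hok.owns.liveIn hown rest frames h1 h2
  · exact Loose.data hinv.heap hok.owns hdat (w := ⟨a, a + k⟩) h1 h2
  · exact HeapWin.live hinv.heap (hok.owns.live _ hown) (w := ⟨a, a + k⟩) h1 h2

/-- **DGifGetLine's footprint misses the SavedImages array** (the raster, pv and gif are other owned objects; the callee's stack
`w0` and the cursor lie below the heap): every field of a counted slot reads the same behind the call (`Mem.EqOn.rd`). The
footprint is the contract's, as `u_same` delivers it between the cut and the returned state. -/
theorem arr_kept_getLine {H : Heap} {rest : List Obj} {frames : List (Nat × FrameLayout)} {top : Nat} {F : Forest} {R : Rd}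
    {mem mem' : Mem} {s : Saved} {init : List Img} {g : Img} {r n : Nat} {w0 : Span} (hinv : HeapInv H rest frames top mem)
    (hok : GifOK H F R mem) (hbase : H.base = 0x800000) (hcur : R.cur + 16 ≤ 0x800000) (hs : F.saved = some s)
    (hi : s.imgs = init ++ [g]) (hr : g.raster = some (r, n)) (hw0 : w0.hi ≤ 0x800000)
    (hsame : Mem.SameExcept
      [w0,
       ⟨r, r + n⟩,
       ⟨F.pv, F.pv + 24936⟩,
       ⟨F.gif + 96, F.gif + 100⟩,
       ⟨R.cur, R.cur + 8⟩] mem mem') :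
    Mem.EqOn s.arr (s.arr + 56 * s.cap) mem mem' := by
  have hheap := hinv.heap
  have hp := hok.owns.placed hheap
  obtain ⟨hrown, hrdat⟩ := Forest.raster_mem hs hi hr
  have haown := Forest.arr_owned hs
  have hastruct := Forest.arr_struct hs
  have hgmem : (F.gif, 120) ∈ F.owned := List.mem_cons_self
  have hpmem : (F.pv, 24936) ∈ F.owned := List.mem_cons_of_mem _ List.mem_cons_self
  have hne := hp.structs_ne.1 _ hastruct
  simp only at hne
  -- the array is another object than the raster, pv, gif
  have n1 : (s.arr, 56 * s.cap) ≠ (r, n) := by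
    intro e
    have e1 : s.arr = r := congrArg Prod.fst e
    exact (hp.structs_ne.2 _ hrdat).2.2 _ hastruct e1
  have n2 : (s.arr, 56 * s.cap) ≠ (F.pv, 24936) := by
    intro e
    exact hne.2 (congrArg Prod.fst e)
  have n3 : (s.arr, 56 * s.cap) ≠ (F.gif, 120) := by
    intro e
    exact hne.1 (congrArg Prod.fst e)
  have f1 := hok.owns.far hheap haown hrown n1
  have f2 := hok.owns.far hheap haown hpmem n2
  have f3 := hok.owns.far hheap haown hgmem n3
  have hain := hok.owns.inside hheap haown
  simp only at f1 f2 f3 hain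
  apply hsame.eqOn
  intro w hw
  simp only [List.mem_cons, List.mem_nil_iff, or_false] at hw
  rcases hw with e | e | e | e | e
  · subst e
    omega
  · subst e
    simp only
    omega
  · subst e
    simp only
    omega
  · subst e
    simp only
    omega
  · subst e
    simp only
    omega

/-- **WHERE gif AND THE SavedImages ARRAY ARE**, as the linear facts a walk's side conditions and the frame lemmas need, ONE
INEQUALITY PER FIELD (the walker's side tactic does not look inside a conjunction): both are objects of the heap's region, in the
data space, 64 bytes apart; the last counted slot `s.arr + 56 * init.length` lies inside the array; the array's object of the heap. -/
structure SlurpWhere (H : Heap) (F : Forest) (s : Saved) (init : List Img) : Prop where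
  /-- gif lies in the region of the heap, in the data space -/
  gif_lo : H.base + 64 ≤ F.gif
  gif_hi : F.gif + 120 + 32 ≤ 0xC00000
  /-- the array lies in the region of the heap, in the data space -/
  arr_lo : H.base + 64 ≤ s.arr
  arr_hi : s.arr + 56 * s.cap + 32 ≤ 0xC00000
  /-- the last counted slot is a slot of the array -/
  slot_in : init.length + 1 ≤ s.cap
  /-- gif and the array are 64 bytes apart -/
  far : F.gif + 120 + 64 ≤ s.arr ∨ s.arr + 56 * s.cap + 64 ≤ F.gif
  /-- the array's object of the heap -/
  obj : ∃ x, x ∈ H.objs ∧ x.base = s.arr ∧ 56 * s.cap ≤ x.cap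

/-- **Where gif and the last counted slot are**, from the state invariant and the heap's invariant (`rw [At.base]` turns
`H.base` into 800000H). -/
theorem slurp_where {H : Heap} {F : Forest} {R : Rd} {mem : Mem} {s : Saved} {init : List Img} {g : Img} (hok : GifOK H F R mem)
    (hheap : HeapOK H mem) (hs : F.saved = some s) (hi : s.imgs = init ++ [g]) : SlurpWhere H F s init := by
  have hgmem : (F.gif, 120) ∈ F.owned := List.mem_cons_self
  have hamem := Forest.arr_owned hs
  have hgin := hok.owns.inside hheap hgmem
  have hain := hok.owns.inside hheap hamem
  simp only at hgin hain
  have hlen := hok.shape.slot_in hs hi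
  -- gif is not the array: no structural window has gif's base
  have hne : (F.gif, 120) ≠ (s.arr, 56 * s.cap) := by
    intro e
    have e1 : F.gif = s.arr := congrArg Prod.fst e
    have hn := ((hok.owns.placed hheap).structs_ne.1 _ (Forest.arr_struct hs)).1
    exact hn e1.symm
  have hfar := hok.owns.far hheap hgmem hamem hne
  simp only at hfar
  -- the array's object
  obtain ⟨c, hlc⟩ := hok.owns.live _ hamem
  have hsc := hheap.size_le_cap hlc
  simp only at hsc
  refine ⟨by omega, by omega, by omega, by omega, hlen, hfar, ⟨_, hlc, rfl, hsc⟩⟩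

/-- **The forest without its last counted image is complete**, if the images before the last were (the post of
DGifDecreaseImageCounter: `F'.imgs = init`; `hdone` is `Last.done`). -/
theorem Forest.complete_drop {F' : Forest} {init : List Img} (h : F'.imgs = init) (hdone : ∀ x, x ∈ init → x.raster ≠ none) :
    F'.Complete := by
  rw [Forest.complete_iff, h]
  exact hdone

/-- **Every counted image has its raster when the last has one and the others had** (`Last.done` and `g.raster = some (r, n)`: at
`IR`; the NULL arm of the move). -/
theorem Forest.complete_same {F : Forest} {s : Saved} {init : List Img} {g : Img} {r n : Nat} (hs : F.saved = some s)
    (hi : s.imgs = init ++ [g]) (hdone : ∀ x, x ∈ init → x.raster ≠ none) (hr : g.raster = some (r, n)) : F.Complete := by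
  rw [Forest.complete_iff, Forest.imgs_some hs, hi]
  intro x hx
  rcases List.mem_append.mp hx with hold | hnew
  · exact hdone x hold
  · rw [List.mem_singleton.mp hnew, hr]
    exact Option.some_ne_none _

/-- **Every counted image of the forest after the move has its raster**: the move changes the last image's extension list only. -/
theorem Forest.complete_move {F : Forest} {s : Saved} {init : List Img} {g : Img} {r n : Nat}
    (hdone : ∀ x, x ∈ init → x.raster ≠ none) (hr : g.raster = some (r, n)) : (F.movedPend s init g).Complete := by
  intro s' hs' x hx
  have e : s' = { s with imgs := init ++ [{ g with ext := F.pend }] } := (Option.some.inj hs').symm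
  subst e
  rcases List.mem_append.mp hx with hold | hnew
  · exact hdone x hold
  · rw [List.mem_singleton.mp hnew]
    simp only [hr]
    exact Option.some_ne_none _

/-! ### 2. The move of the pending list into the last image -/

/-- **The stores of the move miss every structural window but the SavedImages array's**: one loose window `w0` (the return
addresses of the four checks), two windows of the array's object (the slot's `ExtensionBlocks`, `ExtensionBlockCount`), two of gif
(the same two fields). A step of `Shape.move_pend`. -/
theorem SlurpWhere.structs_kept {H : Heap} {F : Forest} {R : Rd} {mem mem' : Mem} {s : Saved} {init : List Img} {w0 : Span}
    (W : SlurpWhere H F s init) (G : carry_Geo H F R) (hw0 : Loose H F R w0)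
    (hsame : Mem.SameExcept
      [w0,
       ⟨s.arr + 56 * init.length + 48, s.arr + 56 * init.length + 56⟩,
       ⟨s.arr + 56 * init.length + 40, s.arr + 56 * init.length + 44⟩,
       ⟨F.gif + 88, F.gif + 96⟩,
       ⟨F.gif + 80, F.gif + 84⟩] mem mem') :
    ∀ o, o ∈ F.structs → o.1 ≠ s.arr → Mem.EqOn o.1 (o.1 + o.2) mem mem' := by
  intro o ho hne
  obtain ⟨xa, hxa, eba, hca⟩ := W.obj
  obtain ⟨xg, hxg, ebg, hcg⟩ := G.gifObj
  have hslot := W.slot_in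
  have hneg : o.1 ≠ xg.base := by
    rw [ebg]
    exact (G.struct_ne o ho).1
  have hnea : o.1 ≠ xa.base := by
    rw [eba]
    exact hne
  apply hsame.eqOn
  intro w hw
  simp only [List.mem_cons, List.mem_nil_iff, or_false] at hw
  rcases hw with e | e | e | e | e
  · subst e
    have hmiss := Loose.off_structs G hw0 o ho
    omega
  · subst e
    have hmiss := (G.in_obj hxa (w := ⟨s.arr + 56 * init.length + 48, s.arr + 56 * init.length + 56⟩)
      (by simp only; omega) (by simp only; omega)).2.2.1 o ho hnea
    simp only at hmiss ⊢
    omega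
  · subst e
    have hmiss := (G.in_obj hxa (w := ⟨s.arr + 56 * init.length + 40, s.arr + 56 * init.length + 44⟩)
      (by simp only; omega) (by simp only; omega)).2.2.1 o ho hnea
    simp only at hmiss ⊢
    omega
  · subst e
    have hmiss := (G.in_obj hxg (w := ⟨F.gif + 88, F.gif + 96⟩) (by simp only; omega) (by simp only; omega)).2.2.1 o ho hneg
    simp only at hmiss ⊢
    omega
  · subst e
    have hmiss := (G.in_obj hxg (w := ⟨F.gif + 80, F.gif + 84⟩) (by simp only; omega) (by simp only; omega)).2.2.1 o ho hneg
    simp only at hmiss ⊢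
    omega

/-- **The structural windows of the counted images are structural windows of the forest with another base than the array.** A
step of `Shape.move_pend` (the colour maps and extension lists of the images read the same behind the four stores). -/
theorem Forest.img_structs {H : Heap} {F : Forest} {R : Rd} {s : Saved} (G : carry_Geo H F R) (hs : F.saved = some s) :
    ∀ o, o ∈ s.imgs.flatMap Img.structs → o ∈ F.structs ∧ o.1 ≠ s.arr := by
  intro o ho
  have hsub : (Saved.structs F.saved).Sublist F.structs := by
    unfold Forest.structs
    exact (List.sublist_append_right _ _).trans (List.sublist_append_left _ _)
  have hpw := G.apart.sublist hsub
  rw [hs] at hpw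
  unfold Saved.structs at hpw
  obtain ⟨hhead, _⟩ := List.pairwise_cons.mp hpw
  have hne := hhead o ho
  simp only at hne
  refine ⟨?_, fun e => hne e.symm⟩
  apply carry_mem_structs_saved
  rw [hs]
  exact List.mem_cons_of_mem _ ho

/-- **THE STEP OF THE SHAPE FOR THE MOVE** (dgif_lib.c:1267-1272; segment 9 of DGifSlurp). The memory changed in four windows: the
last counted slot's `ExtensionBlocks` (`slot + 48`) and `ExtensionBlockCount` (`slot + 40`), gif's `ExtensionBlocks` (`gif + 88`) and
`ExtensionBlockCount` (`gif + 80`) — and in ONE loose window `w0` (the return addresses of the four checks, on the own stack: the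
walk's nest interleaves them with the stores, so the footprint cannot be the four windows alone); the slot's two fields hold what
gif's two fields held (`v1 v2`), gif's two fields hold 0 (`v3 v4`). Then the memory has the shape of the forest after the move.
NOTHING IS ASKED OF `F.pend`: with `none` the step moves `(0, 0)`; no case split, no NULL test is needed. -/
theorem Shape.move_pend {H : Heap} {F : Forest} {R : Rd} {mem mem' : Mem} {s : Saved} {init : List Img} {g : Img} {w0 : Span}
    (hok : GifOK H F R mem) (hheap : HeapOK H mem) (hcur : 0x700000 ≤ R.cur ∧ R.cur + 16 ≤ 0x800000)
    (hs : F.saved = some s) (hi : s.imgs = init ++ [g]) (hw0 : Loose H F R w0)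
    (hsame : Mem.SameExcept
      [w0,
       ⟨s.arr + 56 * init.length + 48, s.arr + 56 * init.length + 56⟩,
       ⟨s.arr + 56 * init.length + 40, s.arr + 56 * init.length + 44⟩,
       ⟨F.gif + 88, F.gif + 96⟩,
       ⟨F.gif + 80, F.gif + 84⟩] mem mem')
    (v1 : SavedImage.ExtensionBlocks mem' (s.arr + 56 * init.length) = GifFileType.ExtensionBlocks mem F.gif)
    (v2 : SavedImage.ExtensionBlockCount mem' (s.arr + 56 * init.length) = GifFileType.ExtensionBlockCount mem F.gif)
    (v3 : GifFileType.ExtensionBlocks mem' F.gif = 0)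
    (v4 : GifFileType.ExtensionBlockCount mem' F.gif = 0) :
    Shape (F.movedPend s init g) R mem' := by
  have hsh := hok.shape
  have hp := hok.owns.placed hheap
  have G := carry_Geo.intro hsh hp hheap hcur
  have W := slurp_where hok hheap hs hi
  obtain ⟨xa, hxa, eba, hca⟩ := W.obj
  have hslot := W.slot_in
  have hfar := W.far
  have hkept := W.structs_kept G hw0 hsame
  have hoff0 : carry_Off F R True True True True True w0 := carry_Off.of_loose G hw0
  have h0arr := hoff0.savS trivial _ (by rw [hs]; exact List.mem_cons_self)
  rw [hi] at h0arr
  simp only [List.length_append, List.length_singleton] at h0arr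
  have h0sav := hoff0.savF trivial
  have h0cnt := hoff0.cntF trivial
  have hlt : ∀ o, o ∈ F.structs → o.1 + o.2 < 2 ^ 64 := by
    intro o ho
    obtain ⟨y, hy, e, hcap⟩ := G.structObj o ho
    have := G.inData y hy
    omega
  -- a read off the four windows and off `w0`
  have hrd : ∀ a n, a + n < 2 ^ 64 →
      (a + n ≤ s.arr + 56 * init.length + 40 ∨ s.arr + 56 * init.length + 56 ≤ a) →
      (a + n ≤ F.gif + 80 ∨ F.gif + 96 ≤ a) → (a + n ≤ w0.lo ∨ w0.hi ≤ a) → rd mem' a n = rd mem a n := by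
    intro a n h3 h1 h2 h0
    apply hsame.rd a n h3
    intro w hw
    simp only [List.mem_cons, List.mem_nil_iff, or_false] at hw
    rcases hw with e | e | e | e | e
    · subst e
      exact h0
    · subst e
      simp only
      omega
    · subst e
      simp only
      omega
    · subst e
      simp only
      omega
    · subst e
      simp only
      omega
  have hgin := W.gif_lo
  have hghi := W.gif_hi
  have hain := W.arr_lo
  have hahi := W.arr_hi
  unfold Forest.movedPend
  apply hsh.set_saved_pend hp hheap hcur hsame
  · -- every window is loose, a window of gif's two fields, or a window of the array's object
    intro w hw
    simp only [List.mem_cons, List.mem_nil_iff, or_false] at hw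
    rcases hw with e | e | e | e | e
    · subst e
      exact Or.inl hw0
    · subst e
      exact Or.inr (Or.inr (Or.inr ⟨s, xa, hs, hxa, eba, by simp only; omega, by simp only; omega⟩))
    · subst e
      exact Or.inr (Or.inr (Or.inr ⟨s, xa, hs, hxa, eba, by simp only; omega, by simp only; omega⟩))
    · subst e
      exact Or.inr (Or.inl ⟨by simp only; omega, by simp only; omega⟩)
    · subst e
      exact Or.inr (Or.inl ⟨by simp only; omega, by simp only; omega⟩)
  · -- the SavedImages array: the last slot has the list
    have f1 : GifFileType.SavedImages mem' F.gif = GifFileType.SavedImages mem F.gif := by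
      simp only [gfield]
      exact hrd (F.gif + 72) 8 (by omega) (by omega) (by omega) (by omega)
    have f2 : GifFileType.ImageCount mem' F.gif = GifFileType.ImageCount mem F.gif := by
      simp only [gfield]
      exact hrd (F.gif + 32) 4 (by omega) (by omega) (by omega) (by omega)
    rw [f1, f2]
    have hsaved := hsh.saved
    rw [hs] at hsaved
    have hold : ImgAt (s.arr + 56 * init.length) g mem := hsh.last_img hs hi
    have hlast : ∀ o, o ∈ Img.structs g → o ∈ F.structs ∧ o.1 ≠ s.arr := by
      intro o ho
      apply Forest.img_structs G hs
      rw [hi, List.flatMap_append]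
      apply List.mem_append_right
      simp only [List.flatMap_cons, List.flatMap_nil, List.append_nil]
      exact ho
    apply hsaved.set_last hi
    · -- the slots before the last
      apply hsame.eqOn
      intro w hw
      simp only [List.mem_cons, List.mem_nil_iff, or_false] at hw
      rcases hw with e | e | e | e | e
      · subst e
        omega
      · subst e
        simp only
        omega
      · subst e
        simp only
        omega
      · subst e
        simp only
        omega
      · subst e
        simp only
        omega
    · -- the structural parts of the images before the last
      intro o ho
      have hin : o ∈ s.imgs.flatMap Img.structs := by
        rw [hi, List.flatMap_append]
        exact List.mem_append_left _ ho
      obtain ⟨k1, k2⟩ := Forest.img_structs G hs o hin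
      exact hkept o k1 k2
    · intro o ho
      rw [← hs] at ho
      exact hlt o (carry_mem_structs_saved ho)
    · -- the last slot: colour map and raster as they were, the extension list is the pending one
      obtain ⟨c1, c2, c3⟩ := hold
      refine ⟨?_, ?_, ?_⟩
      · have e1 : SavedImage.ImageDesc.ColorMap mem' (s.arr + 56 * init.length) =
            SavedImage.ImageDesc.ColorMap mem (s.arr + 56 * init.length) := by
          simp only [gfield]
          exact hrd _ 8 (by omega) (by omega) (by omega) (by omega)
        show MapAt g.cm (SavedImage.ImageDesc.ColorMap mem' (s.arr + 56 * init.length)) mem'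
        rw [e1]
        apply c1.frame
        · intro o ho
          obtain ⟨k1, k2⟩ := hlast o (List.mem_append_left _ ho)
          exact hkept o k1 k2
        · intro x hx
          have hin : (x.obj, 24) ∈ Img.structs g := by
            unfold Img.structs
            rw [hx]
            simp only [Map.structs, List.mem_append, List.mem_singleton, true_or]
          exact hlt _ (hlast _ hin).1
      · have e2 : SavedImage.RasterBits mem' (s.arr + 56 * init.length) = SavedImage.RasterBits mem (s.arr + 56 * init.length) := by
          simp only [gfield]
          exact hrd _ 8 (by omega) (by omega) (by omega) (by omega)
        have e5 : SavedImage.ImageDesc.Width mem' (s.arr + 56 * init.length) =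
            SavedImage.ImageDesc.Width mem (s.arr + 56 * init.length) := by
          simp only [gfield]
          exact hrd _ 4 (by omega) (by omega) (by omega) (by omega)
        have e6 : SavedImage.ImageDesc.Height mem' (s.arr + 56 * init.length) =
            SavedImage.ImageDesc.Height mem (s.arr + 56 * init.length) := by
          simp only [gfield]
          exact hrd _ 4 (by omega) (by omega) (by omega) (by omega)
        show RasterAt g.raster (s.arr + 56 * init.length) mem'
        unfold RasterAt at c2 ⊢
        rw [e2, e5, e6]
        exact c2
      · show ExtsAt F.pend (SavedImage.ExtensionBlocks mem' (s.arr + 56 * init.length))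
          (SavedImage.ExtensionBlockCount mem' (s.arr + 56 * init.length)) mem'
        rw [v1, v2]
        apply hsh.pend.frame
        · intro o ho
          have hne : o.1 ≠ s.arr := by
            have hc := G.cross.2.2.2.2 _ (by rw [hs]; exact List.mem_cons_self) o ho
            simp only at hc
            exact fun e => hc e.symm
          exact hkept o (carry_mem_structs_pend ho) hne
        · intro x hx
          apply hlt (x.arr, 24 * x.blocks.length)
          apply carry_mem_structs_pend
          rw [hx]
          exact List.mem_singleton.mpr rfl
  · -- nothing is pending
    exact ⟨v3, v4⟩

/-- **THE WHOLE EXIT OF THE MOVE IN ONE** (segment 9 of DGifSlurp behind its four stores): the heap's invariant (the stores went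
into two live objects and a window off the heap), the state invariant for the forest after the move (`Owns.perm` with
`Forest.owned_move_pend`: no object moves; `Shape.move_pend`), every counted image complete, the reader's measure unchanged. The
machine half of the segment supplies the footprint (`u_same`), the four field values (`u_read`, `rd_eq_readLE`) and `w0`'s two
facts (`At.push_win`). `hg` is `Last.noext` (EX3), `hdone` is `Last.done`. -/
theorem GifOK.move_pend {H : Heap} {rest : List Obj} {frames : List (Nat × FrameLayout)} {top : Nat} {F : Forest} {R : Rd}
    {mem mem' : Mem} {s : Saved} {init : List Img} {g : Img} {r n : Nat} {w0 : Span}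
    (hok : GifOK H F R mem) (hinv : HeapInv H rest frames top mem) (hcur : 0x700000 ≤ R.cur ∧ R.cur + 16 ≤ 0x800000)
    (hs : F.saved = some s) (hi : s.imgs = init ++ [g]) (hg : g.ext = none) (hdone : ∀ x, x ∈ init → x.raster ≠ none)
    (hr : g.raster = some (r, n)) (hun : ShadowUntouched mem mem') (hw0 : Loose H F R w0) (hw0' : HeapWin H w0)
    (hsame : Mem.SameExcept
      [w0,
       ⟨s.arr + 56 * init.length + 48, s.arr + 56 * init.length + 56⟩,
       ⟨s.arr + 56 * init.length + 40, s.arr + 56 * init.length + 44⟩,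
       ⟨F.gif + 88, F.gif + 96⟩,
       ⟨F.gif + 80, F.gif + 84⟩] mem mem')
    (v1 : SavedImage.ExtensionBlocks mem' (s.arr + 56 * init.length) = GifFileType.ExtensionBlocks mem F.gif)
    (v2 : SavedImage.ExtensionBlockCount mem' (s.arr + 56 * init.length) = GifFileType.ExtensionBlockCount mem F.gif)
    (v3 : GifFileType.ExtensionBlocks mem' F.gif = 0)
    (v4 : GifFileType.ExtensionBlockCount mem' F.gif = 0) :
    HeapInv H rest frames top mem' ∧ GifOK H (F.movedPend s init g) R mem' ∧ (F.movedPend s init g).Complete ∧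
      rem R mem' = rem R mem := by
  have hheap := hinv.heap
  have hp := hok.owns.placed hheap
  have G := carry_Geo.intro hok.shape hp hheap hcur
  have W := slurp_where hok hheap hs hi
  obtain ⟨xa, hxa, eba, hca⟩ := W.obj
  obtain ⟨xg, hxg, ebg, hcg⟩ := G.gifObj
  have hslot := W.slot_in
  have howns : Owns H (F.movedPend s init g).owned := hok.owns.perm (Forest.owned_move_pend F s init g hs hi hg).symm
  have hshape : Shape (F.movedPend s init g) R mem' := Shape.move_pend hok hheap hcur hs hi hw0 hsame v1 v2 v3 v4
  refine ⟨?_, ⟨howns, hshape⟩, Forest.complete_move hdone hr, ?_⟩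
  · -- the heap's invariant: every window is off the heap or inside one object
    apply hinv.sameExcept hun hsame
    intro w hw
    simp only [List.mem_cons, List.mem_nil_iff, or_false] at hw
    rcases hw with e | e | e | e | e
    · subst e
      exact hw0'
    · subst e
      exact Or.inr ⟨xa, hxa, by simp only; omega, by simp only; omega⟩
    · subst e
      exact Or.inr ⟨xa, hxa, by simp only; omega, by simp only; omega⟩
    · subst e
      exact Or.inr ⟨xg, hxg, by simp only; omega, by simp only; omega⟩
    · subst e
      exact Or.inr ⟨xg, hxg, by simp only; omega, by simp only; omega⟩
  · -- the reader's measure: no window meets the cursor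
    have hca' := G.offCur xa hxa
    have hcg' := G.offCur xg hxg
    apply rem_sameExcept hsame (by omega)
    intro w hw
    simp only [List.mem_cons, List.mem_nil_iff, or_false] at hw
    rcases hw with e | e | e | e | e
    · subst e
      exact hw0.off_cursor hheap hp hcur
    · subst e
      simp only
      omega
    · subst e
      simp only
      omega
    · subst e
      simp only
      omega
    · subst e
      simp only
      omega

/-! ### 3. `Core` and `At` from one state of the body to a later one -/

namespace DGifSlurp

/-- **A WINDOW THE BODY MAY WRITE**: the function's stack BELOW the six saved registers (`[RA − 848, RA − 48)`: the pushed return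
addresses, the own frame, the callees' frames), the contract's window `[800000H, 1000020H)` (the heap's region and the shadow), or
the cursor's `cur`. A footprint of such windows keeps the six saved registers and the return address (`Core.carry`). Proved per
window by `unfold DGifSlurp.BodyWin`, `simp only`, `omega` (with `he_room`, `he_top`, the cursor's range and `Owns.inside` of the
object in the context). -/
def BodyWin (e : State) (R : Rd) (x : Span) : Prop :=
  ((e.reg .rsp).toNat - 848 ≤ x.lo ∧ x.hi ≤ (e.reg .rsp).toNat - 48) ∨
  (0x800000 ≤ x.lo ∧ x.hi ≤ 0x1000020) ∨
  (R.cur ≤ x.lo ∧ x.hi ≤ R.cur + 8)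

/-- **`Core` AT A LATER STATE OF THE BODY.** From `Core` at `v` to `Core` at `w`: the stack pointer, `rbp`, `r14` as they were
(`w_kept .rbp rfl`, `w_kept .r14 rfl`), and the memory changed only in windows `ws` each of which is a `BodyWin`. The six slots of
the saved registers and the return-address slot `[RA, RA + 8)` are met by no such window (`RA + 8 ≤ 800000H`, `RA + 8 ≤ R.cur`);
the footprint since the entry by `Mem.SameExcept.step_same'`. Used at EVERY exit of a segment and at every returned state. -/
theorem Core.carry {cut cut' : Word} {H : Heap} {rest : List Obj} {frames : List (Nat × FrameLayout)} {F : Forest} {R : Rd}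
    {u₀ e : State} {ret : Word} {v w : State} {ws : List Span}
    (hc : Core cut H rest frames F R u₀ e ret v)
    (hrip : w.rip = cut') (hrsp : w.reg .rsp = e.reg .rsp - 152) (hrbp : w.reg .rbp = v.reg .rbp)
    (hr14 : w.reg .r14 = v.reg .r14) (hsame : Mem.SameExcept ws v.mem w.mem)
    (hws : ∀ x, x ∈ ws → BodyWin e R x)
    (hrem : Gif.Spec.rem R w.mem ≤ Gif.Spec.rem R v.mem) (hcode : (conv u₀).code.In w.mem) (habi : (conv u₀).inv w) :
    Core cut' H rest frames F R u₀ e ret w := by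
  have he := hc.entry
  u_entry he
  simp only [vspec, ProgX.conv_stackLo, ProgX.conv_stackHi] at he_room he_top
  obtain ⟨henv, _, _⟩ := hc.pre
  have hcur := henv.ctx.cursor_range henv.heap.inv.shadow
  -- a slot `[a, a + 8)` between `RA − 48` and `RA + 8` (a saved register, the return address) is met by no window
  have hslot : ∀ (a : Word), (e.reg .rsp).toNat - 48 ≤ a.toNat → a.toNat + 8 ≤ (e.reg .rsp).toNat + 8 →
      w.mem.readLE a 8 = v.mem.readLE a 8 := by
    intro a h1 h2
    apply hsame.readLE a 8 (by omega)
    intro y hy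
    have hy' := hws y hy
    unfold BodyWin at hy'
    omega
  refine ⟨hc.entry, hc.pre, hrip, hrsp, ?_, ?_, ?_, ?_, ?_, ?_, ?_, ?_, ?_, ?_, ?_, hcode, habi⟩
  · rw [hrbp]
    exact hc.rbp
  · rw [hr14]
    exact hc.r14
  · rw [hslot _ (by u_omega) (by u_omega)]
    exact hc.slot_r15
  · rw [hslot _ (by u_omega) (by u_omega)]
    exact hc.slot_r14
  · rw [hslot _ (by u_omega) (by u_omega)]
    exact hc.slot_r13
  · rw [hslot _ (by u_omega) (by u_omega)]
    exact hc.slot_r12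
  · rw [hslot _ (by u_omega) (by u_omega)]
    exact hc.slot_rbp
  · rw [hslot _ (by u_omega) (by u_omega)]
    exact hc.slot_rbx
  · rw [hslot _ (by omega) (by omega)]
    exact hc.slot_ra
  · exact Nat.le_trans hrem hc.rem
  · -- the footprint since the entry: every window is empty or lies inside one of the contract's
    apply hc.same.step_same' hsame
    intro y hy
    by_cases hempty : y.hi ≤ y.lo
    · exact Or.inl hempty
    · right
      have hy' := hws y hy
      unfold BodyWin at hy'
      simp only [X86.User.inSpans_cons, X86.User.inSpans_nil, or_false]
      omega

/-- **The present heap's base is 800000H** (`SameRegion` with the entry's heap, `HeapPre.base`): turns `Owns.inside`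
(`Hc.base + 64 ≤ o.1`) and `SlurpWhere` into numbers that separate the heap from the stack. -/
theorem At.base {cut : Word} {H : Heap} {rest : List Obj} {frames : List (Nat × FrameLayout)} {F : Forest} {R : Rd}
    {Hc : Heap} {Fc : Forest} {u₀ e : State} {ret : Word} {v : State}
    (hA : At cut H rest frames F R Hc Fc u₀ e ret v) : Hc.base = 0x800000 := by
  obtain ⟨henv, _, _⟩ := hA.core.pre
  rw [hA.region.1]
  exact henv.heap.base

/-- **THE WINDOW OF A PUSHED RETURN ADDRESS** `[RA − 160, RA − 152)` (every `call` and every check of the body pushes there: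
`rsp = RA − 152`), in the four forms the lemmas ask, each over the singleton list: a `BodyWin` (`Core.carry`, `At.carry_loose`,
`At.after_call`), loose and a heap window (`At.carry_loose`, `At.env_callee`, `At.after_call`, `GifOK.move_pend`), off
`[pv + 8, pv + 48)` (`LZOK.sameExcept`). -/
theorem At.push_win {cut : Word} {H : Heap} {rest : List Obj} {frames : List (Nat × FrameLayout)} {F : Forest} {R : Rd}
    {Hc : Heap} {Fc : Forest} {u₀ e : State} {ret : Word} {v : State}
    (hA : At cut H rest frames F R Hc Fc u₀ e ret v) :
    (∀ x, x ∈ [(⟨(e.reg .rsp).toNat - 160, (e.reg .rsp).toNat - 152⟩ : Span)] → BodyWin e R x) ∧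
    (∀ x, x ∈ [(⟨(e.reg .rsp).toNat - 160, (e.reg .rsp).toNat - 152⟩ : Span)] → Loose Hc Fc R x) ∧
    (∀ x, x ∈ [(⟨(e.reg .rsp).toNat - 160, (e.reg .rsp).toNat - 152⟩ : Span)] → HeapWin Hc x) ∧
    (∀ x, x ∈ [(⟨(e.reg .rsp).toNat - 160, (e.reg .rsp).toNat - 152⟩ : Span)] → x.hi ≤ F.pv + 8 ∨ F.pv + 48 ≤ x.lo) := by
  have he := hA.core.entry
  u_entry he
  simp only [vspec, ProgX.conv_stackLo, ProgX.conv_stackHi] at he_room he_top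
  obtain ⟨henv, _, _⟩ := hA.core.pre
  have hcur := henv.ctx.cursor_range henv.heap.inv.shadow
  have hHb := hA.base
  have hpin := hA.ok.owns.inside hA.inv.heap (o := (Fc.pv, 24936)) (List.mem_cons_of_mem _ List.mem_cons_self)
  simp only at hpin
  rw [hHb, hA.pv] at hpin
  refine ⟨?_, ?_, ?_, ?_⟩
  · intro x hx
    have ex := List.mem_singleton.mp hx
    subst ex
    unfold BodyWin
    simp only
    omega
  · intro x hx
    have ex := List.mem_singleton.mp hx
    subst ex
    exact Loose.stack hA.inv.heap (by simp only; omega) (by simp only; omega) (by simp only; omega)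
  · intro x hx
    have ex := List.mem_singleton.mp hx
    subst ex
    apply HeapWin.offHeap hA.inv.heap
    left
    simp only
    omega
  · intro x hx
    have ex := List.mem_singleton.mp hx
    subst ex
    simp only
    omega

/-- **`At` THROUGH A FOOTPRINT OF LOOSE HEAP WINDOWS**: the same heap, the same forest; the reader's measure is what it was. What a
segment needs at an exit when it stored only into its own stack (the pushed return address of a check: `At.push_win`), a scalar
field of gif, the body of pv or a data object. -/
theorem At.carry_loose {cut cut' : Word} {H : Heap} {rest : List Obj} {frames : List (Nat × FrameLayout)} {F : Forest} {R : Rd}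
    {Hc : Heap} {Fc : Forest} {u₀ e : State} {ret : Word} {v w : State} {ws : List Span}
    (hA : At cut H rest frames F R Hc Fc u₀ e ret v)
    (hrip : w.rip = cut') (hrsp : w.reg .rsp = e.reg .rsp - 152) (hrbp : w.reg .rbp = v.reg .rbp)
    (hr14 : w.reg .r14 = v.reg .r14) (hun : ShadowUntouched v.mem w.mem) (hsame : Mem.SameExcept ws v.mem w.mem)
    (hws : ∀ x, x ∈ ws → BodyWin e R x)
    (hl : ∀ x, x ∈ ws → Loose Hc Fc R x) (hw : ∀ x, x ∈ ws → HeapWin Hc x)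
    (hcode : (conv u₀).code.In w.mem) (habi : (conv u₀).inv w) :
    At cut' H rest frames F R Hc Fc u₀ e ret w ∧ rem R w.mem = rem R v.mem := by
  obtain ⟨henv, _, _⟩ := hA.core.pre
  have hcur := henv.ctx.cursor_range henv.heap.inv.shadow
  have hcur2 : 0x700000 ≤ R.cur ∧ R.cur + 16 ≤ 0x800000 := ⟨hcur.1, hcur.2.1⟩
  have hrem : rem R w.mem = rem R v.mem := rem_loose hsame hl hA.inv.heap (hA.ok.owns.placed hA.inv.heap) hcur2
  refine ⟨⟨?_, hA.region, hA.gif, hA.pv, ?_, ?_⟩, hrem⟩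
  · exact hA.core.carry hrip hrsp hrbp hr14 hsame hws (Nat.le_of_eq hrem) hcode habi
  · exact hA.inv.sameExcept hun hsame hw
  · exact hA.ok.sameExcept hA.inv.heap hcur2 hsame hl

/-- **`At` AT A LATER STATE WITH THE SAME MEMORY** (`hmem` is the walker's `w_mem`): behind a returned call the walk went over
`jmp`, `mov r, r`, `test ; jcc` only. The exit of an arm that stores nothing. -/
theorem At.carry_eq {cut cut' : Word} {H : Heap} {rest : List Obj} {frames : List (Nat × FrameLayout)} {F : Forest} {R : Rd}
    {Hc : Heap} {Fc : Forest} {u₀ e : State} {ret : Word} {v w : State}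
    (hA : At cut H rest frames F R Hc Fc u₀ e ret v)
    (hrip : w.rip = cut') (hrsp : w.reg .rsp = e.reg .rsp - 152) (hrbp : w.reg .rbp = v.reg .rbp)
    (hr14 : w.reg .r14 = v.reg .r14) (hmem : w.mem = v.mem)
    (hcode : (conv u₀).code.In w.mem) (habi : (conv u₀).inv w) :
    At cut' H rest frames F R Hc Fc u₀ e ret w := by
  have hsame : Mem.SameExcept ([] : List Span) v.mem w.mem := by
    rw [hmem]
    exact Mem.SameExcept.refl _ _
  have hws : ∀ x, x ∈ ([] : List Span) → BodyWin e R x := by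
    intro x hx
    exact absurd hx List.not_mem_nil
  have hrem : rem R w.mem ≤ rem R v.mem := by
    rw [hmem]
    exact Nat.le_refl _
  refine ⟨hA.core.carry hrip hrsp hrbp hr14 hsame hws hrem hcode habi, hA.region, hA.gif, hA.pv, ?_, ?_⟩
  · rw [hmem]
    exact hA.inv
  · rw [hmem]
    exact hA.ok

/-- **THE PRECONDITION `Env` OF EVERY CALLEE, from `At`** (what `At`'s doc comment says in words): `s` is the state at the `call` (the
return address pushed: `rsp = RA − 160`), the memory differs from the cut's in loose heap windows only (the pushed return address:
`At.push_win`; whatever the segment stored before the call), no shadow byte was written. The callee's list of frames is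
`framesIn frames e`: the own frame is active. -/
theorem At.env_callee {cut : Word} {H : Heap} {rest : List Obj} {frames : List (Nat × FrameLayout)} {F : Forest} {R : Rd}
    {Hc : Heap} {Fc : Forest} {u₀ e : State} {ret : Word} {v s : State} {ws : List Span}
    (hA : At cut H rest frames F R Hc Fc u₀ e ret v)
    (hrsp : s.reg .rsp = e.reg .rsp - 160) (hun : ShadowUntouched v.mem s.mem) (hsame : Mem.SameExcept ws v.mem s.mem)
    (hl : ∀ x, x ∈ ws → Loose Hc Fc R x) (hw : ∀ x, x ∈ ws → HeapWin Hc x) :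
    Env Hc rest (framesIn frames e) Fc R s := by
  have he := hA.core.entry
  u_entry he
  simp only [vspec, ProgX.conv_stackLo, ProgX.conv_stackHi] at he_room he_top
  obtain ⟨henv, _, _⟩ := hA.core.pre
  have hcur := henv.ctx.cursor_range henv.heap.inv.shadow
  have htop : (s.reg .rsp).toNat + 8 = (e.reg .rsp).toNat - 152 := by
    rw [hrsp]
    u_omega
  have hinv' : HeapInv Hc rest (framesIn frames e) ((s.reg .rsp).toNat + 8) s.mem := by
    rw [htop]
    exact hA.inv.sameExcept hun hsame hw
  refine ⟨⟨hinv', ?_, ?_, henv.heap.text, henv.heap.offText⟩, henv.ctx.push _ _, ?_⟩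
  · exact hA.base
  · rw [hA.region.2]
    exact henv.heap.limit
  · exact hA.ok.sameExcept hA.inv.heap ⟨hcur.1, hcur.2.1⟩ hsame hl

/-- **THE HUB: `At` AT THE STATE A CONTRACT CALL RETURNED TO**, for the heap `H'` and the forest `F'` of the callee's post. `v` is a
state with `At` (the cut, or the hub of an earlier call), `s` the state at the `call` (`rsp = RA − 160`; `hpre`, `hl0`: between `v`
and `s` only loose windows were written: the pushed return address, `At.push_win`), `w` the returned state; `hb` is the callee's
`Back2` (`Back.back2` for a callee that keeps heap and forest), `hgif`, `hpv` its two equations; `hsame` is the callee's footprint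
together with the push, from `v` to `w` (`u_same`), every window a `BodyWin`. State it BETWEEN `v_after_call` AND THE NEXT WALK, under
a name without `w_`: every arm behind the call, and the next callee's `Env` (`At.env_callee`), start from it. -/
theorem At.after_call {cut cut' : Word} {H : Heap} {rest : List Obj} {frames : List (Nat × FrameLayout)} {F : Forest} {R : Rd}
    {Hc : Heap} {Fc : Forest} {u₀ e : State} {ret : Word} {v s w : State} {ws0 ws : List Span} {H' : Heap} {F' : Forest}
    (hA : At cut H rest frames F R Hc Fc u₀ e ret v)
    (hsrsp : s.reg .rsp = e.reg .rsp - 160) (hpre : Mem.SameExcept ws0 v.mem s.mem) (hl0 : ∀ x, x ∈ ws0 → Loose Hc Fc R x)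
    (hb : Back2 Hc rest (framesIn frames e) R s w H' F') (hgif : F'.gif = Fc.gif) (hpv : F'.pv = Fc.pv)
    (hrip : w.rip = cut') (hrsp : w.reg .rsp = e.reg .rsp - 152) (hrbp : w.reg .rbp = v.reg .rbp)
    (hr14 : w.reg .r14 = v.reg .r14) (hsame : Mem.SameExcept ws v.mem w.mem) (hws : ∀ x, x ∈ ws → BodyWin e R x)
    (hcode : (conv u₀).code.In w.mem) (habi : (conv u₀).inv w) :
    At cut' H rest frames F R H' F' u₀ e ret w ∧ rem R w.mem ≤ rem R v.mem := by
  have he := hA.core.entry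
  u_entry he
  simp only [vspec, ProgX.conv_stackLo, ProgX.conv_stackHi] at he_room he_top
  obtain ⟨henv, _, _⟩ := hA.core.pre
  have hcur := henv.ctx.cursor_range henv.heap.inv.shadow
  have hcur2 : 0x700000 ≤ R.cur ∧ R.cur + 16 ≤ 0x800000 := ⟨hcur.1, hcur.2.1⟩
  have htop : (s.reg .rsp).toNat + 8 = (e.reg .rsp).toNat - 152 := by
    rw [hsrsp]
    u_omega
  -- the reader's measure: unchanged up to the call, not larger behind it
  have hrem0 : rem R s.mem = rem R v.mem := rem_loose hpre hl0 hA.inv.heap (hA.ok.owns.placed hA.inv.heap) hcur2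
  have hrem : rem R w.mem ≤ rem R v.mem := by
    rw [← hrem0]
    exact hb.rem
  have hinv : HeapInv H' rest (framesIn frames e) ((e.reg .rsp).toNat - 152) w.mem := by
    rw [← htop]
    exact hb.inv
  have hcore := hA.core.carry hrip hrsp hrbp hr14 hsame hws hrem hcode habi
  exact ⟨⟨hcore, hA.region.trans hb.region, hgif.trans hA.gif, hpv.trans hA.pv, hinv, hb.ok⟩, hrem⟩

end DGifSlurp

end Gif.Spec
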